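-- pv_equiv track=rewrite | github.com/DaronP/Tesis_Sandbox | aggressive.py | make_chords
-- ===== SOURCE A (Python) =====
-- mixolydian = [2, 2, 1, 2, 2, 1]
--
-- chords_form = [2, 4]
--
-- def make_chords(pitch_f, flag=False):
--     chords = []
--     chords.append(pitch_f)
--     if not flag:
--         for i in chords_form:
--             pitch_sum = pitch_f + sum(mixolydian[:i])
--             chords.append(pitch_sum)
--     else:
--         mix = mixolydian[1:]
--         for i in chords_form:
--             pitch_sum = pitch_f + sum(mix[:i])
--             chords.append(pitch_sum)
--
--     return chords
-- ===== SOURCE B (Python) =====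
-- def make_chords(pitch_f, flag=False):
--     return [pitch_f, pitch_f + (3 if flag else 4), pitch_f + 7]
-- ===== Notes on version B (the rewrite author's own statement) =====
-- stated objective: simpler
-- what changed: Replaces the loop over chords_form with prefix-sum slicing of the mixolydian list by a closed-form return of the three pitches with constant offsets (0, 3 or 4, 7).
import Mathlib
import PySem

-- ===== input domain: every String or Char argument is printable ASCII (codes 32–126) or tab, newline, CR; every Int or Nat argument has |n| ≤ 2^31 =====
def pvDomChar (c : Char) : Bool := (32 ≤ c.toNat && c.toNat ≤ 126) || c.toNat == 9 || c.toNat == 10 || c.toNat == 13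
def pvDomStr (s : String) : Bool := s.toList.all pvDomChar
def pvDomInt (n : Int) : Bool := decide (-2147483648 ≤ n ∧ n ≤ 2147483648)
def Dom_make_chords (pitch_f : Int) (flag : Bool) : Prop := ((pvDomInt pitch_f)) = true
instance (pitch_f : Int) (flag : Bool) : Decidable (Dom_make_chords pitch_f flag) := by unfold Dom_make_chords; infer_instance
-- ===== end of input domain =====

-- B replaces A's loop-and-slice summation by a closed-form list of the three pitches (simpler).

-- ===== PORT A =====
def mixolydian : List Int := [2, 2, 1, 2, 2, 1]
def chords_form : List Int := [2, 4]

def make_chords (pitch_f : Int) (flag : Bool) : List Int :=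
  let chords : List Int := [pitch_f]
  if !flag then
    chords_form.foldl (fun acc i =>
      let pitch_sum := pitch_f + ((PySem.List.slice mixolydian none (some i)).foldl (· + ·) 0)
      acc ++ [pitch_sum]) chords
  else
    let mix := PySem.List.slice mixolydian (some 1) none
    chords_form.foldl (fun acc i =>
      let pitch_sum := pitch_f + ((PySem.List.slice mix none (some i)).foldl (· + ·) 0)
      acc ++ [pitch_sum]) chords

-- ===== PORT B =====
def make_chords_alt (pitch_f : Int) (flag : Bool) : List Int :=
  [pitch_f, pitch_f + (if flag then 3 else 4), pitch_f + 7]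

-- ===== PRECONDITION & SPEC =====
def Spec_make_chords (pitch_f : Int) (flag : Bool) (out : List Int) : Prop := out = make_chords_alt pitch_f flag
instance (pitch_f : Int) (flag : Bool) (out : List Int) : Decidable (Spec_make_chords pitch_f flag out) := by unfold Spec_make_chords; infer_instance

-- ===== CLAIM (what is proved, stated in full; the proofs are below) =====
def Claim_equal_make_chords : Prop := ∀ (pitch_f : Int) (flag : Bool), Dom_make_chords pitch_f flag → Spec_make_chords pitch_f flag (make_chords pitch_f flag)

-- ===== LEMMAS AND PROOFS =====

-- ===== VERDICT (by name: the statement is the Claim_ definition above) =====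
theorem make_chords_spec : Claim_equal_make_chords := by
  intro p f _
  unfold Spec_make_chords make_chords make_chords_alt chords_form mixolydian
  cases f <;> simp [PySem.List.slice]
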